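-- pv_equiv track=rewrite | github.com/furest/tbWebgui | installers/bestchannel.py | ban_channels
-- ===== SOURCE A (Python) =====
-- def ban_channels(networks_array, max_bssid_per_chan):
--         banned_channels = []
--         nb_ssid_per_channel = dict()
--         for channel in [1, 6, 11]:
--             nb_ssid_per_channel[channel] = sum(n['channel'] == channel for n in networks_array )
--             if nb_ssid_per_channel[channel] > max_bssid_per_chan:
--                 banned_channels.append(channel)
--         return banned_channels, nb_ssid_per_channel
-- ===== SOURCE B (Python) =====
-- def ban_channels(networks_array, max_bssid_per_chan):
--     # one pass over the networks with three counters instead of three full scans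
--     c1 = c6 = c11 = 0
--     for n in networks_array:
--         c = n['channel']
--         if c == 1:
--             c1 += 1
--         elif c == 6:
--             c6 += 1
--         elif c == 11:
--             c11 += 1
--     nb_ssid_per_channel = {1: c1, 6: c6, 11: c11}
--     banned_channels = [ch for ch, cnt in nb_ssid_per_channel.items()
--                        if cnt > max_bssid_per_chan]
--     return banned_channels, nb_ssid_per_channel
-- ===== Notes on version B (the rewrite author's own statement) =====
-- stated objective: faster
-- what changed: B makes a single pass over networks_array maintaining three counters (one per channel 1/6/11) and then derives the dict and the banned list from the counters, instead of A's three separate full scans (one sum(...) generator pass per channel).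
import Mathlib
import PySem

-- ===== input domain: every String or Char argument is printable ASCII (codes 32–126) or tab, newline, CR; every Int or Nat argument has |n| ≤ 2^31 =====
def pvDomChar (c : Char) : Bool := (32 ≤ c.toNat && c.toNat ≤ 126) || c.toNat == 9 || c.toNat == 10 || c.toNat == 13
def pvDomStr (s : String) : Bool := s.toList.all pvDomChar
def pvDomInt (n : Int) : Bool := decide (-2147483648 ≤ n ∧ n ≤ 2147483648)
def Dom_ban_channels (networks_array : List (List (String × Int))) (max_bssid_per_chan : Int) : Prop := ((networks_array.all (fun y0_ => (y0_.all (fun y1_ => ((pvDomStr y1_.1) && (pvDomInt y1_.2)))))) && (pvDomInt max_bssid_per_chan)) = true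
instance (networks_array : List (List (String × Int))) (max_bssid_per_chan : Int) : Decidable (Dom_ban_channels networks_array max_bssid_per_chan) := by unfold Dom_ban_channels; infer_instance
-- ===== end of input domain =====

-- B replaces A's three full scans of networks_array (one sum per channel) by a single
-- pass with three counters; the dict and the banned list are derived from the counters.

-- n['channel'] : first-match lookup in the association list (shared dict-access helper)
def pvChan (n : List (String × Int)) : Option Int := (PySem.Dict.mk n).get? "channel"

-- ===== PORT A =====
def ban_channels (networks_array : List (List (String × Int))) (max_bssid_per_chan : Int) : List Int × (List (Int × Int)) :=
  let st := ([1, 6, 11] : List Int).foldl (fun (st : List Int × PySem.Dict Int Int) channel =>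
    let cnt : Int := networks_array.foldl
      (fun acc n => acc + (if pvChan n = some channel then 1 else 0)) 0
    let d := st.2.insert channel cnt
    let banned := if cnt > max_bssid_per_chan then st.1 ++ [channel] else st.1
    (banned, d)) ([], PySem.Dict.empty)
  (st.1, st.2.items)

-- ===== PORT B =====
def ban_channels_alt (networks_array : List (List (String × Int))) (max_bssid_per_chan : Int) : List Int × (List (Int × Int)) :=
  let cs : Int × Int × Int := networks_array.foldl (fun (acc : Int × Int × Int) n =>
    let c := pvChan n
    if c = some 1 then (acc.1 + 1, acc.2.1, acc.2.2)
    else if c = some 6 then (acc.1, acc.2.1 + 1, acc.2.2)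
    else if c = some 11 then (acc.1, acc.2.1, acc.2.2 + 1)
    else acc) (0, 0, 0)
  let nb : List (Int × Int) := [(1, cs.1), (6, cs.2.1), (11, cs.2.2)]
  let banned := (nb.filter (fun p => p.2 > max_bssid_per_chan)).map (·.1)
  (banned, nb)

-- ===== PRECONDITION & SPEC =====
-- Pre_ excludes exactly the inputs where some network has no 'channel' key: there the
-- Python A (and B) raise KeyError.
def Pre_ban_channels (networks_array : List (List (String × Int))) (max_bssid_per_chan : Int) : Prop :=
  networks_array.all (fun n => n.any (fun p => p.1 == "channel")) = true
instance (networks_array : List (List (String × Int))) (max_bssid_per_chan : Int) : Decidable (Pre_ban_channels networks_array max_bssid_per_chan) := by unfold Pre_ban_channels; infer_instance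

def pvWitness_ban_channels : (List (List (String × Int))) × Int := ([[("channel", 6)], [("channel", 1)]], 0)

def Spec_ban_channels (networks_array : List (List (String × Int))) (max_bssid_per_chan : Int) (out : List Int × (List (Int × Int))) : Prop := out = ban_channels_alt networks_array max_bssid_per_chan
instance (networks_array : List (List (String × Int))) (max_bssid_per_chan : Int) (out : List Int × (List (Int × Int))) : Decidable (Spec_ban_channels networks_array max_bssid_per_chan out) := by unfold Spec_ban_channels; infer_instance

-- ===== CLAIM (what is proved, stated in full; the proofs are below) =====
def Claim_equal_ban_channels : Prop := ∀ (networks_array : List (List (String × Int))) (max_bssid_per_chan : Int), Dom_ban_channels networks_array max_bssid_per_chan → Pre_ban_channels networks_array max_bssid_per_chan → Spec_ban_channels networks_array max_bssid_per_chan (ban_channels networks_array max_bssid_per_chan)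

-- ===== LEMMAS AND PROOFS =====

-- A's per-channel count, as a named function
def pvCnt (ch : Int) (na : List (List (String × Int))) : Int :=
  na.foldl (fun acc n => acc + (if pvChan n = some ch then 1 else 0)) 0

lemma pvCnt_fold (ch : Int) (na : List (List (String × Int))) (a : Int) :
    na.foldl (fun acc n => acc + (if pvChan n = some ch then 1 else 0)) a = a + pvCnt ch na := by
  induction na generalizing a with
  | nil => simp [pvCnt]
  | cons x xs ih =>
    rw [List.foldl_cons, ih]
    conv_rhs => rw [pvCnt, List.foldl_cons, ih]
    ring

lemma pvCnt_cons (ch : Int) (x : List (String × Int)) (xs : List (List (String × Int))) :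
    pvCnt ch (x :: xs) = (if pvChan x = some ch then 1 else 0) + pvCnt ch xs := by
  conv_lhs => rw [pvCnt, List.foldl_cons]
  rw [pvCnt_fold]; ring

lemma bfold_eq (na : List (List (String × Int))) (a b c : Int) :
    na.foldl (fun (acc : Int × Int × Int) n =>
      let ch := pvChan n
      if ch = some 1 then (acc.1 + 1, acc.2.1, acc.2.2)
      else if ch = some 6 then (acc.1, acc.2.1 + 1, acc.2.2)
      else if ch = some 11 then (acc.1, acc.2.1, acc.2.2 + 1)
      else acc) (a, b, c)
    = (a + pvCnt 1 na, b + pvCnt 6 na, c + pvCnt 11 na) := by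
  induction na generalizing a b c with
  | nil => simp [pvCnt]
  | cons x xs ih =>
    have h1 := pvCnt_cons 1 x xs
    have h6 := pvCnt_cons 6 x xs
    have h11 := pvCnt_cons 11 x xs
    simp only [List.foldl_cons, h1, h6, h11]
    split_ifs with hA hB hC <;> simp_all <;> simp [pvCnt] <;> ring_nf

-- ===== VERDICT (by name: the statement is the Claim_ definition above) =====
theorem ban_channels_spec : Claim_equal_ban_channels := by
  intro na m _ _
  show ban_channels na m = ban_channels_alt na m
  unfold ban_channels ban_channels_alt
  simp only [List.foldl_cons, List.foldl_nil]
  rw [pvCnt_fold 1, pvCnt_fold 6, pvCnt_fold 11, bfold_eq]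
  simp only [zero_add]
  refine Prod.ext ?_ ?_
  · show _ = List.map _ (List.filter _ [(1, pvCnt 1 na), (6, pvCnt 6 na), (11, pvCnt 11 na)])
    simp only [List.filter_cons, List.filter_nil]
    split_ifs <;> simp_all <;> omega
  · show (((PySem.Dict.empty.insert 1 (pvCnt 1 na)).insert 6 (pvCnt 6 na)).insert 11 (pvCnt 11 na)).items = _
    simp [PySem.Dict.empty, PySem.Dict.insert, PySem.Dict.contains]
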